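-- pv_equiv track=rewrite | github.com/Nikolaihoj1/millpoint-qa | app.py | calculate_exit_control_samples
-- ===== SOURCE A (Python) =====
-- def calculate_exit_control_samples(lot_quantity):
--     """Calculate which parts to sample: first 5 + every 10th after."""
--     samples = []
--     # First 5 parts
--     for i in range(1, min(6, lot_quantity + 1)):
--         samples.append(i)
--     # Every 10th after part 5
--     if lot_quantity > 5:
--         part = 15
--         while part <= lot_quantity:
--             samples.append(part)
--             part += 10
--     return samples
-- ===== SOURCE B (Python) =====
-- def calculate_exit_control_samples(lot_quantity):
--     """Calculate which parts to sample: first 5 + every 10th after."""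
--     return [i for i in range(1, lot_quantity + 1)
--             if i <= 5 or (i - 5) % 10 == 0]
-- ===== Notes on version B (the rewrite author's own statement) =====
-- stated objective: simpler
-- what changed: Replaces the two-segment construction (bounded prefix loop plus a stride-10 while loop) with a single comprehension over 1..lot_quantity using one uniform selection predicate.
import Mathlib
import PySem

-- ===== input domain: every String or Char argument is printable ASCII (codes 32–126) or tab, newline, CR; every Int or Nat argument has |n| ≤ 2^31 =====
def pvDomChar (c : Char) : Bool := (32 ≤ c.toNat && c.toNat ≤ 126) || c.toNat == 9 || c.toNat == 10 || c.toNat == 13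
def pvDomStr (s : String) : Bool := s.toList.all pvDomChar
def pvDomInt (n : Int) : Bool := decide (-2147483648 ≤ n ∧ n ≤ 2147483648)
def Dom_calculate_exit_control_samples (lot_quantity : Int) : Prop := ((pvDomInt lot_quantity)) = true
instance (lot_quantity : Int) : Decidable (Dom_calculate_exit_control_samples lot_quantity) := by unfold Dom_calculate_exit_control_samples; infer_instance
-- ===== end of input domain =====

-- B replaces A's two-segment build (prefix loop + stride-10 while loop) with one
-- scan over 1..n and a uniform selection predicate (objective: simpler).

-- ===== PORT A =====
-- the 'while part <= lot_quantity: samples.append(part); part += 10' loop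
def pvLoopA (lot_quantity : Int) (part : Int) (samples : List Int) : List Int :=
  if part ≤ lot_quantity then
    pvLoopA lot_quantity (part + 10) (samples ++ [part])
  else samples
termination_by (lot_quantity + 1 - part).toNat
decreasing_by omega

def calculate_exit_control_samples (lot_quantity : Int) : List Int :=
  let samples : List Int :=
    (PySem.List.pyRange 1 (min 6 (lot_quantity + 1)) 1).foldl (fun acc i => acc ++ [i]) []
  if lot_quantity > 5 then pvLoopA lot_quantity 15 samples else samples

-- ===== PORT B =====
def calculate_exit_control_samples_alt (lot_quantity : Int) : List Int :=
  (PySem.List.pyRange 1 (lot_quantity + 1) 1).foldl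
    (fun acc i => if i ≤ 5 || PySem.Int.mod (i - 5) 10 == 0 then acc ++ [i] else acc) []

-- ===== PRECONDITION & SPEC =====
def Spec_calculate_exit_control_samples (lot_quantity : Int) (out : List Int) : Prop := out = calculate_exit_control_samples_alt lot_quantity
instance (lot_quantity : Int) (out : List Int) : Decidable (Spec_calculate_exit_control_samples lot_quantity out) := by unfold Spec_calculate_exit_control_samples; infer_instance

-- ===== CLAIM (what is proved, stated in full; the proofs are below) =====
def Claim_equal_calculate_exit_control_samples : Prop := ∀ (lot_quantity : Int), Dom_calculate_exit_control_samples lot_quantity → Spec_calculate_exit_control_samples lot_quantity (calculate_exit_control_samples lot_quantity)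

-- ===== LEMMAS AND PROOFS =====

-- the selection predicate of B
def pvSel (i : Int) : Bool := i ≤ 5 || PySem.Int.mod (i - 5) 10 == 0

lemma pvSel_true (i : Int) (h : i ≤ 5 ∨ (i - 5) % 10 = 0) : pvSel i = true := by
  unfold pvSel
  rw [PySem.Int.mod_eq_emod_of_pos (by omega : (0:Int) < 10)]
  rcases h with h | h
  · simp [h]
  · simp [h]

lemma pvSel_false (i : Int) (h1 : ¬ i ≤ 5) (h2 : ¬ (i - 5) % 10 = 0) : pvSel i = false := by
  unfold pvSel
  rw [PySem.Int.mod_eq_emod_of_pos (by omega : (0:Int) < 10)]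
  simp [h1, h2]

-- B in closed form: the filter of the full range
lemma alt_eq_filter (n : Int) :
    calculate_exit_control_samples_alt n
      = (PySem.List.pyRange 1 (n + 1) 1).filter pvSel := by
  unfold calculate_exit_control_samples_alt
  simpa [pvSel] using
    PySem.List.foldl_append_if_eq_filter (l := PySem.List.pyRange 1 (n + 1) 1)
      (p := pvSel) (acc := ([] : List Int))

-- bumping the upper bound of the while loop by one (fuel-indexed induction)
lemma pvLoopA_succ_fuel (fuel : Nat) :
    ∀ (ub part : Int) (acc : List Int), (ub + 1 - part).toNat ≤ fuel →
    pvLoopA (ub + 1) part acc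
      = pvLoopA ub part acc
        ++ (if part ≤ ub + 1 ∧ (ub + 1 - part) % 10 = 0 then [ub + 1] else []) := by
  induction fuel with
  | zero =>
      intro ub part acc hf
      -- part > ub: both loops with bound ub stop; bound ub+1 may take one step
      conv_lhs => rw [pvLoopA]
      conv_rhs => rw [pvLoopA]
      rw [if_neg (by omega : ¬ part ≤ ub)]
      by_cases h2 : part ≤ ub + 1
      · have hp : part = ub + 1 := by omega
        rw [if_pos h2]
        conv_lhs => rw [pvLoopA]
        rw [if_neg (by omega), if_pos ⟨h2, by omega⟩, hp]
      · rw [if_neg h2, if_neg (by simp [h2]), List.append_nil]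
  | succ m ih =>
      intro ub part acc hf
      by_cases h : part ≤ ub
      · conv_lhs => rw [pvLoopA]
        conv_rhs => rw [pvLoopA]
        rw [if_pos (by omega : part ≤ ub + 1), if_pos h]
        rw [ih ub (part + 10) (acc ++ [part]) (by omega)]
        congr 1
        by_cases hd : (ub + 1 - part) % 10 = 0
        · rw [if_pos (show part + 10 ≤ ub + 1 ∧ (ub + 1 - (part + 10)) % 10 = 0 by omega),
            if_pos (show part ≤ ub + 1 ∧ (ub + 1 - part) % 10 = 0 from ⟨by omega, hd⟩)]
        · rw [if_neg (show ¬ (part + 10 ≤ ub + 1 ∧ (ub + 1 - (part + 10)) % 10 = 0) by omega),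
            if_neg (show ¬ (part ≤ ub + 1 ∧ (ub + 1 - part) % 10 = 0) by omega)]
      · conv_lhs => rw [pvLoopA]
        conv_rhs => rw [pvLoopA]
        rw [if_neg (by omega : ¬ part ≤ ub)]
        by_cases h2 : part ≤ ub + 1
        · have hp : part = ub + 1 := by omega
          rw [if_pos h2]
          conv_lhs => rw [pvLoopA]
          rw [if_neg (by omega), if_pos ⟨h2, by omega⟩, hp]
        · rw [if_neg h2, if_neg (by simp [h2]), List.append_nil]

lemma pvLoopA_succ (ub part : Int) (acc : List Int) :
    pvLoopA (ub + 1) part acc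
      = pvLoopA ub part acc
        ++ (if part ≤ ub + 1 ∧ (ub + 1 - part) % 10 = 0 then [ub + 1] else []) :=
  pvLoopA_succ_fuel (ub + 1 - part).toNat ub part acc (le_refl _)

-- the main induction, on the Nat size of the lot quantity
lemma main_nat (m : Nat) :
    calculate_exit_control_samples (m : Int)
      = calculate_exit_control_samples_alt (m : Int) := by
  induction m with
  | zero =>
      simp only [Nat.cast_zero]
      decide
  | succ k ih =>
      have hm : ((k + 1 : Nat) : Int) = (k : Int) + 1 := by push_cast; ring
      rw [hm]
      rw [alt_eq_filter,
        PySem.List.pyRange_one_succ_right (by omega : (1:Int) ≤ (k:Int) + 1),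
        List.filter_append]
      rw [alt_eq_filter] at ih
      rw [← ih]
      by_cases h5 : (k : Int) + 1 ≤ 5
      · -- still in the first-5 prefix: no while loop on either side
        unfold calculate_exit_control_samples
        rw [if_neg (by omega : ¬ ((k:Int) + 1 > 5)), if_neg (by omega : ¬ ((k:Int) > 5))]
        have hmin1 : min 6 ((k:Int) + 1 + 1) = (k:Int) + 1 + 1 := by omega
        have hmin2 : min 6 ((k:Int) + 1) = (k:Int) + 1 := by omega
        rw [hmin1, hmin2,
          PySem.List.pyRange_one_succ_right (by omega : (1:Int) ≤ (k:Int) + 1),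
          List.foldl_append]
        simp [pvSel_true ((k:Int) + 1) (Or.inl h5)]
      · -- past 5: the prefix is frozen at [1..5]; the while loop grows
        unfold calculate_exit_control_samples
        have hmin : min 6 ((k:Int) + 1 + 1) = 6 := by omega
        rw [if_pos (by omega : (k:Int) + 1 > 5), hmin]
        by_cases h6 : (k : Int) > 5
        · have hmin' : min 6 ((k:Int) + 1) = 6 := by omega
          rw [if_pos h6, hmin', pvLoopA_succ]
          congr 1
          by_cases hd : ((k:Int) + 1 - 15) % 10 = 0
          · rw [if_pos ⟨by omega, hd⟩]
            simp [pvSel_true ((k:Int) + 1) (Or.inr (by omega))]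
          · rw [if_neg (by omega :
                ¬ ((15:Int) ≤ (k:Int) + 1 ∧ ((k:Int) + 1 - 15) % 10 = 0))]
            simp [pvSel_false ((k:Int) + 1) h5 (by omega)]
        · -- k = 5 exactly: the loop at ub = 6 does nothing (15 > 6)
          have hk : (k : Int) = 5 := by omega
          rw [if_neg h6, hk]
          rw [pvLoopA, if_neg (by omega : ¬ (15:Int) ≤ 5 + 1)]
          simp [(show pvSel 6 = false by decide)]

theorem pv_main (n : Int) :
    calculate_exit_control_samples n = calculate_exit_control_samples_alt n := by
  by_cases h : 0 ≤ n
  · have : n = ((n.toNat : Nat) : Int) := by omega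
    rw [this]; exact main_nat n.toNat
  · -- negative: both empty
    unfold calculate_exit_control_samples
    rw [if_neg (by omega : ¬ n > 5),
      PySem.List.pyRange_one_eq_nil (by omega : min 6 (n + 1) ≤ 1)]
    rw [alt_eq_filter, PySem.List.pyRange_one_eq_nil (by omega : n + 1 ≤ 1)]
    rfl

-- ===== VERDICT (by name: the statement is the Claim_ definition above) =====
theorem calculate_exit_control_samples_spec : Claim_equal_calculate_exit_control_samples := by
  intro n _
  unfold Spec_calculate_exit_control_samples
  exact pv_main n
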